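-- pv_equiv track=rewrite | github.com/DanielCorralesAlonso/election_interference | seeded_lda/text_preprocessing.py | merge_seed_phrases_in_documents
-- ===== SOURCE A (Python) =====
-- from collections import Counter, defaultdict
--
-- def merge_seed_phrases_in_doc(tokens, phrase_patterns):
--     if not tokens:
--         return [], 0
--
--     phrase_lookup = defaultdict(list)
--     for pattern in phrase_patterns:
--         phrase_lookup[pattern[0]].append(pattern)
--
--     for first_token in phrase_lookup:
--         phrase_lookup[first_token] = sorted(phrase_lookup[first_token], key=len, reverse=True)
--
--     merged_tokens = []
--     merge_count = 0
--     index = 0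
--     normalized_tokens = [token.lower() for token in tokens]
--
--     while index < len(tokens):
--         first_token = normalized_tokens[index]
--         matched_pattern = None
--
--         for pattern in phrase_lookup.get(first_token, []):
--             phrase_length = len(pattern)
--             if normalized_tokens[index:index + phrase_length] == list(pattern):
--                 matched_pattern = pattern
--                 break
--
--         if matched_pattern is not None:
--             merged_tokens.append("_".join(matched_pattern))
--             merge_count += 1
--             index += len(matched_pattern)
--         else:
--             merged_tokens.append(tokens[index])
--             index += 1
--
--     return merged_tokens, merge_count
--
-- def merge_seed_phrases_in_documents(processed_docs, phrase_patterns):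
--     merged_documents = []
--     total_merges = 0
--     affected_documents = 0
--
--     for doc in processed_docs:
--         merged_doc, merge_count = merge_seed_phrases_in_doc(doc, phrase_patterns)
--         if merge_count > 0:
--             affected_documents += 1
--             total_merges += merge_count
--         merged_documents.append(merged_doc)
--
--     return merged_documents, {"affected_documents": affected_documents, "total_merges": total_merges, "phrase_pattern_count": len(phrase_patterns)}
-- ===== SOURCE B (Python) =====
-- # B: prefix-set automaton instead of A's group-by-first-token + sort-by-length scan.
-- # All nonempty prefixes of every pattern go into one set; a terminal dict maps a full
-- # pattern (as a tuple) to its joined phrase; at each position we extend the current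
-- # prefix token by token, remembering the deepest terminal hit (= longest match).
-- def merge_seed_phrases_in_documents(processed_docs, phrase_patterns):
--     prefixes = set()
--     terminal = {}
--     for pattern in phrase_patterns:
--         cur = ()
--         for tok in pattern:
--             cur = cur + (tok,)
--             prefixes.add(cur)
--         terminal[tuple(pattern)] = "_".join(pattern)
--
--     merged_documents = []
--     total_merges = 0
--     affected_documents = 0
--     for doc in processed_docs:
--         lowered = [t.lower() for t in doc]
--         n = len(doc)
--         merged = []
--         count = 0
--         i = 0
--         while i < n:
--             cur = ()
--             j = i
--             best = None
--             while j < n: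
--                 cur = cur + (lowered[j],)
--                 if cur not in prefixes:
--                     break
--                 j += 1
--                 if cur in terminal:
--                     best = (len(cur), terminal[cur])
--             if best is not None:
--                 merged.append(best[1])
--                 count += 1
--                 i += best[0]
--             else:
--                 merged.append(doc[i])
--                 i += 1
--         merged_documents.append(merged)
--         if count > 0:
--             affected_documents += 1
--             total_merges += count
--     return merged_documents, {"affected_documents": affected_documents, "total_merges": total_merges, "phrase_pattern_count": len(phrase_patterns)}
-- ===== Notes on version B (the rewrite author's own statement) =====
-- stated objective: alternative
-- what changed: Replaces A's group-patterns-by-first-token dict + per-bucket sort-by-length-descending + linear scan with slice comparisons by a prefix-set automaton: one set of all nonempty pattern prefixes plus a terminal dict keyed by the full pattern, and per position a single token-by-token extension that remembers the deepest terminal hit (= longest match).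
import Mathlib
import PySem

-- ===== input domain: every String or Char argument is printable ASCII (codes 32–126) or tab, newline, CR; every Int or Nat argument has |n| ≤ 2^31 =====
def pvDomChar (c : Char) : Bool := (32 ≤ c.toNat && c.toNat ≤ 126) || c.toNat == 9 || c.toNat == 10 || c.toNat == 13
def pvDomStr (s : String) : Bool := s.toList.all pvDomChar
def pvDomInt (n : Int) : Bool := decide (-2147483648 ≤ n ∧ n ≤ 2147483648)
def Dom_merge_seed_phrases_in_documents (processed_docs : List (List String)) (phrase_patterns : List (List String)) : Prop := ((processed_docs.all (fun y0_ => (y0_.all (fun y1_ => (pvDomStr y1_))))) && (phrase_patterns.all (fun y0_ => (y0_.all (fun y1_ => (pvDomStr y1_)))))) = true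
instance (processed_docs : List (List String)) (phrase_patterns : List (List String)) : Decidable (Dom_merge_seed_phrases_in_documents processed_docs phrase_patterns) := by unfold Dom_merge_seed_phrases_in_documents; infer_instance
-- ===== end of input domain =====

-- B replaces A's group-by-first-token + sort-by-length index with a prefix-set automaton
-- (all nonempty pattern prefixes in one set, full patterns in a terminal dict); alternative
-- decomposition, not claimed faster.

-- shared helper: "_".join(pattern)
def pvJoin (p : List String) : String := PySem.Str.join "_" p

-- ===== PORT A =====
-- the while-loop of merge_seed_phrases_in_doc; fuel = tokens.length makes the
-- recursion total (under Pre_ every matched pattern is nonempty, so index strictly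
-- increases and the fuel is never exhausted before index reaches the end)
def pvALoop (phrase_lookup : PySem.Dict String (List (List String))) (tokens normalized : List String) : Nat → Nat → List String → Int → List String × Int
  | 0, _, merged, count => (merged, count)
  | fuel + 1, index, merged, count =>
    if index < tokens.length then
      let first := normalized.getD index ""
      match (phrase_lookup.getD first []).find?
          (fun pattern => PySem.List.slice normalized (some (index : Int)) (some ((index : Int) + (pattern.length : Int))) == pattern) with
      | some p => pvALoop phrase_lookup tokens normalized fuel (index + p.length) (merged ++ [pvJoin p]) (count + 1)
      | none => pvALoop phrase_lookup tokens normalized fuel (index + 1) (merged ++ [tokens.getD index ""]) count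
    else (merged, count)

def merge_seed_phrases_in_doc (tokens : List String) (phrase_patterns : List (List String)) : List String × Int :=
  if tokens = [] then ([], 0)
  else
    -- defaultdict(list): phrase_lookup[pattern[0]].append(pattern)  (pattern[0]: headD; Pre_ keeps patterns nonempty here)
    let lookup1 : PySem.Dict String (List (List String)) :=
      phrase_patterns.foldl (fun d pattern => d.modify (pattern.headD "") [] (· ++ [pattern])) PySem.Dict.empty
    -- for first_token in phrase_lookup: sort that bucket by len, descending
    let lookup2 : PySem.Dict String (List (List String)) :=
      lookup1.keys.foldl (fun d k => d.insert k (PySem.List.sorted (d.getD k []) (fun p => p.length) true)) lookup1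
    let normalized := tokens.map PySem.Str.lower
    pvALoop lookup2 tokens normalized tokens.length 0 [] 0

def merge_seed_phrases_in_documents (processed_docs : List (List String)) (phrase_patterns : List (List String)) : List (List String) × (List (String × Int)) :=
  let st := processed_docs.foldl
    (fun (acc : List (List String) × Int × Int) doc =>
      let r := merge_seed_phrases_in_doc doc phrase_patterns
      if r.2 > 0 then (acc.1 ++ [r.1], acc.2.1 + r.2, acc.2.2 + 1)
      else (acc.1 ++ [r.1], acc.2.1, acc.2.2))
    ([], 0, 0)
  (st.1, [("affected_documents", st.2.2), ("total_merges", st.2.1), ("phrase_pattern_count", PySem.List.len phrase_patterns)])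

-- ===== PORT B =====
-- build: the prefix set (every nonempty prefix of every pattern) and the terminal dict
def pvBuild (phrase_patterns : List (List String)) : PySem.Set (List String) × PySem.Dict (List String) String :=
  phrase_patterns.foldl
    (fun st pattern =>
      let inner := pattern.foldl (fun (q : List String × PySem.Set (List String)) tok =>
        let cur := q.1 ++ [tok]
        (cur, PySem.Set.add q.2 cur)) ([], st.1)
      (inner.2, st.2.insert pattern (pvJoin pattern)))
    (PySem.Set.empty, PySem.Dict.empty)

-- inner while: extend cur while it stays a known prefix, remember the deepest terminal
def pvDescend (prefixes : PySem.Set (List String)) (term : PySem.Dict (List String) String) (lowered : List String) (n : Nat) : Nat → Nat → List String → Option (Nat × String) → Option (Nat × String)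
  | 0, _, _, best => best
  | fuel + 1, j, cur, best =>
    if j < n then
      let cur' := cur ++ [lowered.getD j ""]
      if PySem.Set.contains prefixes cur' then
        let best' := match term.get? cur' with
          | some s => some (cur'.length, s)
          | none => best
        pvDescend prefixes term lowered n fuel (j + 1) cur' best'
      else best
    else best

-- outer while over the document (fuel = n is exact: every match has length ≥ 1)
def pvBLoop (prefixes : PySem.Set (List String)) (term : PySem.Dict (List String) String) (doc lowered : List String) (n : Nat) : Nat → Nat → List String → Int → List String × Int
  | 0, _, merged, count => (merged, count)
  | fuel + 1, i, merged, count =>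
    if i < n then
      match pvDescend prefixes term lowered n (n - i) i [] none with
      | some b => pvBLoop prefixes term doc lowered n fuel (i + b.1) (merged ++ [b.2]) (count + 1)
      | none => pvBLoop prefixes term doc lowered n fuel (i + 1) (merged ++ [doc.getD i ""]) count
    else (merged, count)

def merge_seed_phrases_in_documents_alt (processed_docs : List (List String)) (phrase_patterns : List (List String)) : List (List String) × (List (String × Int)) :=
  let pt := pvBuild phrase_patterns
  let st := processed_docs.foldl
    (fun (acc : List (List String) × Int × Int) doc =>
      let lowered := doc.map PySem.Str.lower
      let r := pvBLoop pt.1 pt.2 doc lowered doc.length doc.length 0 [] 0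
      if r.2 > 0 then (acc.1 ++ [r.1], acc.2.1 + r.2, acc.2.2 + 1)
      else (acc.1 ++ [r.1], acc.2.1, acc.2.2))
    ([], 0, 0)
  (st.1, [("affected_documents", st.2.2), ("total_merges", st.2.1), ("phrase_pattern_count", PySem.List.len phrase_patterns)])

-- ===== PRECONDITION & SPEC =====
-- Pre_ excludes exactly the inputs where A raises: an empty pattern makes pattern[0]
-- an IndexError as soon as any document is nonempty (A returns normally everywhere else).
def Pre_merge_seed_phrases_in_documents (processed_docs : List (List String)) (phrase_patterns : List (List String)) : Prop :=
  [] ∈ phrase_patterns → ∀ doc ∈ processed_docs, doc = []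
instance (processed_docs : List (List String)) (phrase_patterns : List (List String)) : Decidable (Pre_merge_seed_phrases_in_documents processed_docs phrase_patterns) := by unfold Pre_merge_seed_phrases_in_documents; infer_instance
def pvWitness_merge_seed_phrases_in_documents : List (List String) × List (List String) :=
  ([["new", "York", "city"], ["hello"]], [["new", "york"], ["new", "york", "city"]])

def Spec_merge_seed_phrases_in_documents (processed_docs : List (List String)) (phrase_patterns : List (List String)) (out : List (List String) × (List (String × Int))) : Prop := out = merge_seed_phrases_in_documents_alt processed_docs phrase_patterns
instance (processed_docs : List (List String)) (phrase_patterns : List (List String)) (out : List (List String) × (List (String × Int))) : Decidable (Spec_merge_seed_phrases_in_documents processed_docs phrase_patterns out) := by unfold Spec_merge_seed_phrases_in_documents; infer_instance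

-- ===== CLAIM (what is proved, stated in full; the proofs are below) =====
def Claim_equal_merge_seed_phrases_in_documents : Prop := ∀ (processed_docs : List (List String)) (phrase_patterns : List (List String)), Dom_merge_seed_phrases_in_documents processed_docs phrase_patterns → Pre_merge_seed_phrases_in_documents processed_docs phrase_patterns → Spec_merge_seed_phrases_in_documents processed_docs phrase_patterns (merge_seed_phrases_in_documents processed_docs phrase_patterns)

-- ===== LEMMAS AND PROOFS =====

-- ---- common spec: at position i the merge appends the longest pattern that is a
-- ---- prefix of the lowered suffix (pvBestLen), or the original token if none matches

def pvBestLen (pats : List (List String)) (s : List String) : Nat :=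
  pats.foldl (fun m p => if p.isPrefixOf s then max m p.length else m) 0

def pvMkBest (s : List String) (L : Nat) : Option (Nat × String) :=
  if L = 0 then none else some (L, pvJoin (s.take L))

def pvSpecGo (pats : List (List String)) (tokens low : List String) : Nat → Nat → List String → Int → List String × Int
  | 0, _, merged, count => (merged, count)
  | fuel + 1, i, merged, count =>
    if i < tokens.length then
      if pvBestLen pats (low.drop i) = 0 then
        pvSpecGo pats tokens low fuel (i + 1) (merged ++ [tokens.getD i ""]) count
      else
        pvSpecGo pats tokens low fuel (i + pvBestLen pats (low.drop i))
          (merged ++ [pvJoin ((low.drop i).take (pvBestLen pats (low.drop i)))]) (count + 1)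
    else (merged, count)

-- ---- pvBestLen facts

lemma pvBestLen_aux (s : List String) (pats : List (List String)) : ∀ a : Nat,
    a ≤ pats.foldl (fun m p => if p.isPrefixOf s then max m p.length else m) a ∧
    (∀ p ∈ pats, p <+: s → p.length ≤ pats.foldl (fun m p => if p.isPrefixOf s then max m p.length else m) a) ∧
    (pats.foldl (fun m p => if p.isPrefixOf s then max m p.length else m) a = a ∨
      ∃ p ∈ pats, p <+: s ∧ p.length = pats.foldl (fun m p => if p.isPrefixOf s then max m p.length else m) a) := by
  induction pats with
  | nil => intro a; simp
  | cons q qs ih =>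
    intro a
    simp only [List.foldl_cons]
    obtain ⟨h1, h2, h3⟩ := ih (if q.isPrefixOf s then max a q.length else a)
    by_cases hq : q.isPrefixOf s
    · simp only [hq, if_true] at h1 h2 h3 ⊢
      refine ⟨le_trans (Nat.le_max_left _ _) h1, ?_, ?_⟩
      · intro p hp hps
        rcases List.mem_cons.mp hp with hp | hp
        · subst hp; exact le_trans (Nat.le_max_right _ _) h1
        · exact h2 p hp hps
      · rcases h3 with h3 | ⟨p, hp, hps, hl⟩
        · rcases Nat.le_total a q.length with hm | hm
          · exact Or.inr ⟨q, List.mem_cons_self, List.isPrefixOf_iff_prefix.mp hq, by omega⟩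
          · exact Or.inl (by omega)
        · exact Or.inr ⟨p, List.mem_cons_of_mem _ hp, hps, hl⟩
    · simp only [hq] at h1 h2 h3 ⊢
      refine ⟨h1, ?_, ?_⟩
      · intro p hp hps
        rcases List.mem_cons.mp hp with hp | hp
        · subst hp; exact absurd (List.isPrefixOf_iff_prefix.mpr hps) (by simpa using hq)
        · exact h2 p hp hps
      · rcases h3 with h3 | ⟨p, hp, hps, hl⟩
        · exact Or.inl h3
        · exact Or.inr ⟨p, List.mem_cons_of_mem _ hp, hps, hl⟩

lemma pvBestLen_ge {pats : List (List String)} {s p : List String} (hp : p ∈ pats) (hps : p <+: s) :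
    p.length ≤ pvBestLen pats s := (pvBestLen_aux s pats 0).2.1 p hp hps

lemma pvBestLen_cases (pats : List (List String)) (s : List String) :
    pvBestLen pats s = 0 ∨ ∃ p ∈ pats, p <+: s ∧ p.length = pvBestLen pats s :=
  (pvBestLen_aux s pats 0).2.2

lemma pvBestLen_le_length (pats : List (List String)) (s : List String) :
    pvBestLen pats s ≤ s.length := by
  rcases pvBestLen_cases pats s with h | ⟨p, _, hps, hl⟩
  · omega
  · exact hl ▸ hps.length_le

lemma pvBestLen_nil (pats : List (List String)) : pvBestLen pats [] = 0 := by
  rcases pvBestLen_cases pats [] with h | ⟨p, _, hps, hl⟩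
  · exact h
  · rw [List.prefix_nil] at hps; subst hps; simpa using hl.symm

lemma pvBestLen_congr {pats : List (List String)} {s t : List String}
    (h : ∀ p ∈ pats, (p <+: s ↔ p <+: t)) : pvBestLen pats s = pvBestLen pats t := by
  unfold pvBestLen
  refine PySem.List.foldl_congr_mem pats _ _ 0 (fun m p hp => ?_)
  have : p.isPrefixOf s = p.isPrefixOf t := by
    rw [Bool.eq_iff_iff, List.isPrefixOf_iff_prefix, List.isPrefixOf_iff_prefix]
    exact h p hp
  rw [this]

lemma pvBestLen_take_succ (pats : List (List String)) (s : List String) (k : Nat) (hk : k < s.length) :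
    pvBestLen pats (s.take (k + 1)) = if s.take (k + 1) ∈ pats then k + 1 else pvBestLen pats (s.take k) := by
  have hlen : (s.take (k + 1)).length = k + 1 := by simp [List.length_take]; omega
  split_ifs with h
  · refine Nat.le_antisymm (le_trans (pvBestLen_le_length _ _) (by omega)) ?_
    have := pvBestLen_ge h (List.prefix_refl _)
    omega
  · refine pvBestLen_congr (fun p hp => ?_)
    constructor
    · intro hps
      rcases List.prefix_take_iff.mp hps with ⟨hps', hle⟩
      rcases Nat.lt_or_ge p.length (k + 1) with hlt | hge
      · exact List.prefix_take_iff.mpr ⟨hps', by omega⟩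
      · exfalso
        have hpl : p.length = k + 1 := by omega
        have : p = s.take (k + 1) := by
          have := List.prefix_iff_eq_take.mp hps
          rw [this, hpl, List.take_take]
          simp
        exact h (this ▸ hp)
    · intro hps
      rcases List.prefix_take_iff.mp hps with ⟨hps', hle⟩
      exact List.prefix_take_iff.mpr ⟨hps', by omega⟩

lemma pvBestLen_of_blocked (pats : List (List String)) (s : List String) (k : Nat)
    (h : ∀ p ∈ pats, ¬ (s.take (k + 1)) <+: p) :
    pvBestLen pats s = pvBestLen pats (s.take k) := by
  refine pvBestLen_congr (fun p hp => ?_)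
  constructor
  · intro hps
    rcases Nat.lt_or_ge p.length (k + 1) with hlt | hge
    · exact List.prefix_take_iff.mpr ⟨hps, by omega⟩
    · exfalso
      refine h p hp ?_
      have hpeq := List.prefix_iff_eq_take.mp hps
      have : s.take (k + 1) = p.take (k + 1) := by
        conv_rhs => rw [hpeq]
        rw [List.take_take]
        congr 1
        omega
      exact this ▸ List.take_prefix _ _
  · intro hps
    exact (List.prefix_take_iff.mp hps).1

-- ---- A side: the two dict-building loops produce, per key, the length-sorted bucket

lemma pvLookup1_getD (pats : List (List String)) (k : String) :
    (pats.foldl (fun d pattern => d.modify (pattern.headD "") [] (· ++ [pattern])) PySem.Dict.empty).getD k []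
      = pats.filter (fun p => p.headD "" == k) := by
  have h := PySem.Dict.getD_foldl_modify_append (l := pats.map (fun p => (p.headD "", p)))
    (d := PySem.Dict.empty) (c := k)
  rw [List.foldl_map] at h
  simpa [List.filter_map, Function.comp_def] using h

lemma pvSortFold (ks : List String) (hnd : ks.Nodup) (d : PySem.Dict String (List (List String))) (c : String) :
    (ks.foldl (fun d k => d.insert k (PySem.List.sorted (d.getD k []) (fun p => p.length) true)) d).getD c []
      = if c ∈ ks then PySem.List.sorted (d.getD c []) (fun p => p.length) true else d.getD c [] := by
  induction ks generalizing d with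
  | nil => simp
  | cons k ks ih =>
    simp only [List.foldl_cons]
    obtain ⟨hk, hnd'⟩ := List.nodup_cons.mp hnd
    rw [ih hnd']
    by_cases hck : c = k
    · subst hck
      simp [hk, PySem.Dict.getD_insert_self]
    · by_cases hc : c ∈ ks
      · simp [hc, hck, PySem.Dict.getD_insert_of_ne _ _ _ hck]
      · simp [hc, hck, PySem.Dict.getD_insert_of_ne _ _ _ hck]

lemma pvLookup2_getD (pats : List (List String)) (k : String) :
    ((pats.foldl (fun d pattern => d.modify (pattern.headD "") [] (· ++ [pattern])) PySem.Dict.empty).keys.foldl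
        (fun d k => d.insert k (PySem.List.sorted (d.getD k []) (fun p => p.length) true))
        (pats.foldl (fun d pattern => d.modify (pattern.headD "") [] (· ++ [pattern])) PySem.Dict.empty)).getD k []
      = PySem.List.sorted (pats.filter (fun p => p.headD "" == k)) (fun p => p.length) true := by
  have hnd : (pats.foldl (fun d pattern => d.modify (pattern.headD "") [] (· ++ [pattern])) PySem.Dict.empty).keys.Nodup :=
    PySem.Dict.nodup_keys_foldl_modify_key pats (fun p => p.headD "") [] (fun _ p => (· ++ [p]))
      PySem.Dict.empty PySem.Dict.nodup_keys_empty
  rw [pvSortFold _ hnd _ k]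
  by_cases hk : k ∈ (pats.foldl (fun d pattern => d.modify (pattern.headD "") [] (· ++ [pattern])) PySem.Dict.empty).keys
  · rw [if_pos hk, pvLookup1_getD]
  · have hkeys : (pats.foldl (fun d pattern => d.modify (pattern.headD "") [] (· ++ [pattern])) PySem.Dict.empty).keys
        = PySem.Set.ofList (pats.map (fun p => p.headD "")) := by
      rw [PySem.Dict.keys_foldl_modify_key pats (fun p => p.headD "") [] (fun _ p => (· ++ [p])) PySem.Dict.empty]
      simp [PySem.Dict.keys_empty, PySem.Set.update_nil_left]
    have hnmem : k ∉ pats.map (fun p => p.headD "") := by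
      intro hmem
      exact hk (hkeys ▸ (PySem.Set.mem_ofList _ _).mpr hmem)
    have hfil : pats.filter (fun p => p.headD "" == k) = [] := by
      rw [List.filter_eq_nil_iff]
      intro p hp hbeq
      exact hnmem (List.mem_map.mpr ⟨p, hp, by simpa using hbeq⟩)
    rw [if_neg hk, pvLookup1_getD, hfil]
    exact ((PySem.List.sorted_eq_nil_iff _ _ _).mpr rfl).symm

-- ---- A side: find? over the sorted bucket returns exactly the longest matching pattern

lemma pvAStep (pats : List (List String)) (hne : [] ∉ pats) (low : List String) (i : Nat) :
    (PySem.List.sorted (pats.filter (fun p => p.headD "" == low.getD i "")) (fun p => p.length) true).find?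
        (fun pattern => PySem.List.slice low (some (i : Int)) (some ((i : Int) + (pattern.length : Int))) == pattern)
      = if pvBestLen pats (low.drop i) = 0 then none
        else some ((low.drop i).take (pvBestLen pats (low.drop i))) := by
  have hpred : ∀ p : List String,
      (PySem.List.slice low (some (i : Int)) (some ((i : Int) + (p.length : Int))) == p) = decide (p <+: low.drop i) := by
    intro p
    rw [PySem.List.slice_natCast_add]
    by_cases h : p <+: low.drop i
    · simp only [h, decide_true, beq_iff_eq]
      exact (List.prefix_iff_eq_take.mp h).symm
    · simp only [h, decide_false, beq_eq_false_iff_ne, ne_eq]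
      intro hc
      exact h (List.prefix_iff_eq_take.mpr hc.symm)
  by_cases hL : pvBestLen pats (low.drop i) = 0
  · rw [if_pos hL, List.find?_eq_none]
    intro x hx
    rw [hpred x]
    simp only [decide_eq_true_eq]
    intro hxp
    have hx' : x ∈ pats := (List.mem_filter.mp ((PySem.List.mem_sorted _ _ _ x).mp hx)).1
    have h1 := pvBestLen_ge hx' hxp
    have h2 : x ≠ [] := fun h => hne (h ▸ hx')
    have h3 : 0 < x.length := List.length_pos_iff.mpr h2
    omega
  · rw [if_neg hL]
    have hLle : pvBestLen pats (low.drop i) ≤ (low.drop i).length := pvBestLen_le_length _ _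
    have hLpos : 0 < pvBestLen pats (low.drop i) := Nat.pos_of_ne_zero hL
    have hdlen : (low.drop i).length = low.length - i := by simp
    have hplen : ((low.drop i).take (pvBestLen pats (low.drop i))).length = pvBestLen pats (low.drop i) := by
      simp [List.length_take]; omega
    have hppre : (low.drop i).take (pvBestLen pats (low.drop i)) <+: low.drop i := List.take_prefix _ _
    have hpmem : (low.drop i).take (pvBestLen pats (low.drop i)) ∈ pats := by
      rcases pvBestLen_cases pats (low.drop i) with h | ⟨q, hq, hqp, hql⟩
      · exact absurd h hL
      · have : q = (low.drop i).take (pvBestLen pats (low.drop i)) := by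
          rw [← hql]; exact List.prefix_iff_eq_take.mp hqp
        exact this ▸ hq
    have hhead : (((low.drop i).take (pvBestLen pats (low.drop i))).headD "" == low.getD i "") = true := by
      rw [beq_iff_eq, List.headD_eq_head?_getD, List.head?_eq_getElem?, List.getD_eq_getElem?_getD]
      congr 1
      rw [List.getElem?_take_of_lt hLpos, List.getElem?_drop, Nat.add_zero]
    have hpfil : (low.drop i).take (pvBestLen pats (low.drop i)) ∈ pats.filter (fun p => p.headD "" == low.getD i "") :=
      List.mem_filter.mpr ⟨hpmem, hhead⟩
    have hpsort : (low.drop i).take (pvBestLen pats (low.drop i))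
        ∈ PySem.List.sorted (pats.filter (fun p => p.headD "" == low.getD i "")) (fun p => p.length) true :=
      (PySem.List.mem_sorted _ _ _ _).mpr hpfil
    have hsome : ((PySem.List.sorted (pats.filter (fun p => p.headD "" == low.getD i "")) (fun p => p.length) true).find?
        (fun pattern => PySem.List.slice low (some (i : Int)) (some ((i : Int) + (pattern.length : Int))) == pattern)).isSome := by
      rw [List.find?_isSome]
      exact ⟨_, hpsort, by rw [hpred]; simpa using hppre⟩
    obtain ⟨q0, hq0⟩ := Option.isSome_iff_exists.mp hsome
    rw [hq0]
    obtain ⟨hq0p, l1, l2, hdecomp, hl1⟩ := List.find?_eq_some_iff_append.mp hq0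
    have hq0mem : q0 ∈ pats :=
      (List.mem_filter.mp ((PySem.List.mem_sorted _ _ _ _).mp (List.mem_of_find?_eq_some hq0))).1
    have hq0pre : q0 <+: low.drop i := by
      rw [hpred] at hq0p; simpa using hq0p
    have hq0le : q0.length ≤ pvBestLen pats (low.drop i) := pvBestLen_ge hq0mem hq0pre
    have hq0ge : pvBestLen pats (low.drop i) ≤ q0.length := by
      have hpin : (low.drop i).take (pvBestLen pats (low.drop i)) ∈ l1 ++ q0 :: l2 := hdecomp ▸ hpsort
      rcases List.mem_append.mp hpin with h | h
      · exfalso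
        have := hl1 _ h
        rw [hpred] at this
        simp [hppre] at this
      · rcases List.mem_cons.mp h with h | h
        · rw [← h, hplen]
        · have hpw := PySem.List.sorted_pairwise_rev (pats.filter (fun p => p.headD "" == low.getD i "")) (fun p => p.length)
          rw [hdecomp] at hpw
          have h2 := (List.pairwise_append.mp hpw).2.1
          have h3 := (List.pairwise_cons.mp h2).1 _ h
          omega
    have : q0 = (low.drop i).take (pvBestLen pats (low.drop i)) := by
      have heq := List.prefix_iff_eq_take.mp hq0pre
      rw [heq]
      congr 1
      omega
    rw [this]

-- ---- A loop = spec loop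

lemma pvALoop_eq (pats : List (List String)) (hne : [] ∉ pats) (tokens : List String) :
    ∀ fuel i merged count,
    pvALoop
      ((pats.foldl (fun d pattern => d.modify (pattern.headD "") [] (· ++ [pattern])) PySem.Dict.empty).keys.foldl
        (fun d k => d.insert k (PySem.List.sorted (d.getD k []) (fun p => p.length) true))
        (pats.foldl (fun d pattern => d.modify (pattern.headD "") [] (· ++ [pattern])) PySem.Dict.empty))
      tokens (tokens.map PySem.Str.lower) fuel i merged count
      = pvSpecGo pats tokens (tokens.map PySem.Str.lower) fuel i merged count := by
  intro fuel
  induction fuel with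
  | zero => intro i merged count; rfl
  | succ fuel ih =>
    intro i merged count
    by_cases hi : i < tokens.length
    · simp only [pvALoop, if_pos hi]
      rw [pvLookup2_getD pats ((tokens.map PySem.Str.lower).getD i "")]
      rw [pvAStep pats hne (tokens.map PySem.Str.lower) i]
      by_cases hL : pvBestLen pats ((tokens.map PySem.Str.lower).drop i) = 0
      · rw [if_pos hL]
        show pvALoop _ _ _ fuel (i + 1) (merged ++ [tokens.getD i ""]) count = _
        rw [ih]
        conv_rhs => rw [pvSpecGo]
        rw [if_pos hi, if_pos hL]
      · rw [if_neg hL]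
        have hplen : (((tokens.map PySem.Str.lower).drop i).take (pvBestLen pats ((tokens.map PySem.Str.lower).drop i))).length
            = pvBestLen pats ((tokens.map PySem.Str.lower).drop i) := by
          have h1 := pvBestLen_le_length pats ((tokens.map PySem.Str.lower).drop i)
          simp only [List.length_take, List.length_drop, List.length_map] at h1 ⊢
          omega
        show pvALoop _ _ _ fuel
            (i + (((tokens.map PySem.Str.lower).drop i).take (pvBestLen pats ((tokens.map PySem.Str.lower).drop i))).length)
            (merged ++ [pvJoin (((tokens.map PySem.Str.lower).drop i).take (pvBestLen pats ((tokens.map PySem.Str.lower).drop i)))])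
            (count + 1) = _
        rw [hplen, ih]
        conv_rhs => rw [pvSpecGo]
        rw [if_pos hi, if_neg hL]
    · simp only [pvALoop, pvSpecGo, if_neg hi]

-- ---- B side: membership in the built prefix set / terminal dict

lemma pvBuildInner_mem (pattern : List String) : ∀ (cur0 : List String) (s0 : PySem.Set (List String)) (x : List String),
    (x ∈ (pattern.foldl (fun (q : List String × PySem.Set (List String)) tok =>
        (q.1 ++ [tok], PySem.Set.add q.2 (q.1 ++ [tok]))) (cur0, s0)).2)
      ↔ x ∈ s0 ∨ ∃ t, t ≠ [] ∧ t <+: pattern ∧ x = cur0 ++ t := by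
  induction pattern with
  | nil =>
    intro cur0 s0 x
    simp only [List.foldl_nil]
    constructor
    · exact fun h => Or.inl h
    · rintro (h | ⟨t, ht, htp, hx⟩)
      · exact h
      · rw [List.prefix_nil] at htp; exact absurd htp ht
  | cons tok rest ih =>
    intro cur0 s0 x
    simp only [List.foldl_cons]
    rw [ih (cur0 ++ [tok]) (PySem.Set.add s0 (cur0 ++ [tok])) x]
    rw [PySem.Set.mem_add]
    constructor
    · rintro ((h | h) | ⟨t', ht', htp', hx'⟩)
      · exact Or.inl h
      · exact Or.inr ⟨[tok], by simp, ⟨rest, rfl⟩, h⟩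
      · refine Or.inr ⟨tok :: t', by simp, List.cons_prefix_cons.mpr ⟨rfl, htp'⟩, ?_⟩
        rw [hx']; simp
    · rintro (h | ⟨t, ht, htp, hx⟩)
      · exact Or.inl (Or.inl h)
      · match t, ht with
        | a :: t', _ =>
          obtain ⟨ha, ht'p⟩ := List.cons_prefix_cons.mp htp
          subst ha
          rcases eq_or_ne t' [] with h0 | h0
          · subst h0
            exact Or.inl (Or.inr hx)
          · refine Or.inr ⟨t', h0, ht'p, ?_⟩
            rw [hx]; simp

lemma pvBuild_fst_mem (pats : List (List String)) (x : List String) :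
    x ∈ (pvBuild pats).1 ↔ x ≠ [] ∧ ∃ p ∈ pats, x <+: p := by
  suffices h : ∀ st : PySem.Set (List String) × PySem.Dict (List String) String,
      (x ∈ (pats.foldl
        (fun st pattern =>
          let inner := pattern.foldl (fun (q : List String × PySem.Set (List String)) tok =>
            let cur := q.1 ++ [tok]
            (cur, PySem.Set.add q.2 cur)) ([], st.1)
          (inner.2, st.2.insert pattern (pvJoin pattern))) st).1)
      ↔ x ∈ st.1 ∨ (x ≠ [] ∧ ∃ p ∈ pats, x <+: p) by
    have := h (PySem.Set.empty, PySem.Dict.empty)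
    unfold pvBuild
    rw [this]
    simp [PySem.Set.empty]
  induction pats with
  | nil => intro st; simp
  | cons p ps ih =>
    intro st
    simp only [List.foldl_cons]
    rw [ih]
    have hin := pvBuildInner_mem p [] st.1 x
    simp only [List.nil_append] at hin
    rw [hin]
    constructor
    · rintro ((h | ⟨t, ht, htp, hx⟩) | ⟨hx, q, hq, hxq⟩)
      · exact Or.inl h
      · subst hx; exact Or.inr ⟨ht, p, List.mem_cons_self, htp⟩
      · exact Or.inr ⟨hx, q, List.mem_cons_of_mem _ hq, hxq⟩
    · rintro (h | ⟨hx, q, hq, hxq⟩)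
      · exact Or.inl (Or.inl h)
      · rcases List.mem_cons.mp hq with hq | hq
        · subst hq; exact Or.inl (Or.inr ⟨x, hx, hxq, rfl⟩)
        · exact Or.inr ⟨hx, q, hq, hxq⟩

lemma pvBuild_snd_get? (pats : List (List String)) (c : List String) :
    (pvBuild pats).2.get? c = if c ∈ pats then some (pvJoin c) else none := by
  suffices h : ∀ st : PySem.Set (List String) × PySem.Dict (List String) String,
      ((pats.foldl
        (fun st pattern =>
          let inner := pattern.foldl (fun (q : List String × PySem.Set (List String)) tok =>
            let cur := q.1 ++ [tok]
            (cur, PySem.Set.add q.2 cur)) ([], st.1)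
          (inner.2, st.2.insert pattern (pvJoin pattern))) st).2).get? c
      = if c ∈ pats then some (pvJoin c) else st.2.get? c by
    have := h (PySem.Set.empty, PySem.Dict.empty)
    unfold pvBuild
    rw [this]
    by_cases hc : c ∈ pats
    · simp [hc]
    · simp [hc, PySem.Dict.get?_empty]
  induction pats with
  | nil => intro st; simp
  | cons p ps ih =>
    intro st
    simp only [List.foldl_cons]
    rw [ih]
    by_cases h1 : c ∈ ps
    · simp [h1]
    · rw [if_neg h1]
      show (st.2.insert p (pvJoin p)).get? c = _
      rw [PySem.Dict.get?_insert]
      by_cases h2 : c = p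
      · subst h2; simp
      · simp [h1, h2]

lemma pvTakeSucc (s : List String) (k : Nat) (h : k < s.length) (d : String) :
    s.take k ++ [s.getD k d] = s.take (k + 1) := by
  rw [List.getD_eq_getElem s d h, List.take_add_one, List.getElem?_eq_getElem h]
  rfl

-- ---- B side: the descent returns the longest match

lemma pvDescend_eq (pats : List (List String)) (low : List String) (i n : Nat) (hn : n = low.length) :
    ∀ fuel j best, i ≤ j → j ≤ n → n - j ≤ fuel →
    best = pvMkBest (low.drop i) (pvBestLen pats ((low.drop i).take (j - i))) →
    pvDescend (pvBuild pats).1 (pvBuild pats).2 low n fuel j ((low.drop i).take (j - i)) best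
      = pvMkBest (low.drop i) (pvBestLen pats (low.drop i)) := by
  intro fuel
  induction fuel with
  | zero =>
    intro j best hij hjn hfuel hbest
    have hj : j = n := by omega
    subst hj
    have htake : (low.drop i).take (j - i) = low.drop i := by
      apply List.take_of_length_le
      simp [List.length_drop]; omega
    simp only [pvDescend]
    rw [hbest, htake]
  | succ fuel ih =>
    intro j best hij hjn hfuel hbest
    by_cases hj : j < n
    · have hsl : (low.drop i).length = n - i := by simp [List.length_drop]; omega
      have hkk : j - i < (low.drop i).length := by omega
      have hgetD : low.getD j "" = (low.drop i).getD (j - i) "" := by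
        rw [List.getD_eq_getElem?_getD, List.getD_eq_getElem?_getD, List.getElem?_drop]
        congr 2
        omega
      simp only [pvDescend, if_pos hj]
      rw [hgetD, pvTakeSucc (low.drop i) (j - i) hkk ""]
      have hlen1 : ((low.drop i).take (j - i + 1)).length = j - i + 1 := by
        simp [List.length_take]; omega
      have hidx : j + 1 - i = j - i + 1 := by omega
      by_cases hmem : (low.drop i).take (j - i + 1) ∈ (pvBuild pats).1
      · rw [if_pos ((PySem.Set.contains_iff _ _).mpr hmem)]
        rw [pvBuild_snd_get? pats ((low.drop i).take (j - i + 1))]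
        by_cases hpat : (low.drop i).take (j - i + 1) ∈ pats
        · rw [if_pos hpat]
          have hb : (some (((low.drop i).take (j - i + 1)).length, pvJoin ((low.drop i).take (j - i + 1))) : Option (Nat × String))
              = pvMkBest (low.drop i) (pvBestLen pats ((low.drop i).take (j + 1 - i))) := by
            rw [hidx, pvBestLen_take_succ pats (low.drop i) (j - i) hkk, if_pos hpat]
            rw [pvMkBest, if_neg (by omega)]
            rw [hlen1]
          have := ih (j + 1) _ (by omega) (by omega) (by omega) hb
          rw [hidx] at this
          exact this
        · rw [if_neg hpat]
          have hb : best = pvMkBest (low.drop i) (pvBestLen pats ((low.drop i).take (j + 1 - i))) := by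
            rw [hidx, pvBestLen_take_succ pats (low.drop i) (j - i) hkk, if_neg hpat]
            exact hbest
          have := ih (j + 1) best (by omega) (by omega) (by omega) hb
          rw [hidx] at this
          exact this
      · have hcont : PySem.Set.contains (pvBuild pats).1 ((low.drop i).take (j - i + 1)) = false := by
          cases hc : PySem.Set.contains (pvBuild pats).1 ((low.drop i).take (j - i + 1))
          · rfl
          · exact absurd ((PySem.Set.contains_iff _ _).mp hc) hmem
        rw [if_neg (fun hc => hmem ((PySem.Set.contains_iff _ _).mp hc))]
        have hblocked : ∀ p ∈ pats, ¬ ((low.drop i).take (j - i + 1)) <+: p := by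
          intro p hp hpre
          apply hmem
          rw [pvBuild_fst_mem]
          refine ⟨?_, p, hp, hpre⟩
          intro hnil
          rw [hnil] at hlen1
          simp at hlen1
        rw [hbest, pvBestLen_of_blocked pats (low.drop i) (j - i) hblocked]
    · have hj' : j = n := by omega
      subst hj'
      have htake : (low.drop i).take (j - i) = low.drop i := by
        apply List.take_of_length_le
        simp [List.length_drop]; omega
      simp only [pvDescend, if_neg hj]
      rw [hbest, htake]

-- ---- B loop = spec loop

lemma pvBLoop_eq (pats : List (List String)) (doc : List String) :
    ∀ fuel i merged count,
    pvBLoop (pvBuild pats).1 (pvBuild pats).2 doc (doc.map PySem.Str.lower) doc.length fuel i merged count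
      = pvSpecGo pats doc (doc.map PySem.Str.lower) fuel i merged count := by
  intro fuel
  induction fuel with
  | zero => intro i merged count; rfl
  | succ fuel ih =>
    intro i merged count
    by_cases hi : i < doc.length
    · have hn : doc.length = (doc.map PySem.Str.lower).length := by simp
      have hnil : ((doc.map PySem.Str.lower).drop i).take (i - i) = [] := by simp
      have hd := pvDescend_eq pats (doc.map PySem.Str.lower) i doc.length hn (doc.length - i) i none
        (le_refl i) (le_of_lt hi) (le_refl _)
        (by simp [pvMkBest, pvBestLen_nil])
      rw [hnil] at hd
      simp only [pvBLoop, if_pos hi]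
      rw [hd]
      by_cases hL : pvBestLen pats ((doc.map PySem.Str.lower).drop i) = 0
      · rw [pvMkBest, if_pos hL]
        show pvBLoop _ _ _ _ _ fuel (i + 1) (merged ++ [doc.getD i ""]) count = _
        rw [ih]
        conv_rhs => rw [pvSpecGo]
        rw [if_pos hi, if_pos hL]
      · rw [pvMkBest, if_neg hL]
        show pvBLoop _ _ _ _ _ fuel (i + pvBestLen pats ((doc.map PySem.Str.lower).drop i))
            (merged ++ [pvJoin (((doc.map PySem.Str.lower).drop i).take (pvBestLen pats ((doc.map PySem.Str.lower).drop i)))])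
            (count + 1) = _
        rw [ih]
        conv_rhs => rw [pvSpecGo]
        rw [if_pos hi, if_neg hL]
    · simp only [pvBLoop, pvSpecGo, if_neg hi]

-- ---- per-document equality and glue

lemma pvDoc_eq (pats : List (List String)) (hne : [] ∉ pats) (tokens : List String) :
    merge_seed_phrases_in_doc tokens pats
      = pvBLoop (pvBuild pats).1 (pvBuild pats).2 tokens (tokens.map PySem.Str.lower) tokens.length tokens.length 0 [] 0 := by
  by_cases h : tokens = []
  · subst h; rfl
  · unfold merge_seed_phrases_in_doc
    rw [if_neg h]
    rw [pvALoop_eq pats hne tokens, pvBLoop_eq pats tokens]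

-- ===== VERDICT (by name: the statement is the Claim_ definition above) =====
theorem merge_seed_phrases_in_documents_spec : Claim_equal_merge_seed_phrases_in_documents := by
  intro docs pats hdom hpre
  unfold Spec_merge_seed_phrases_in_documents
  unfold merge_seed_phrases_in_documents merge_seed_phrases_in_documents_alt
  have hstep : ∀ (acc : List (List String) × Int × Int) (doc : List String), doc ∈ docs →
      (let r := merge_seed_phrases_in_doc doc pats
       if r.2 > 0 then (acc.1 ++ [r.1], acc.2.1 + r.2, acc.2.2 + 1)
       else (acc.1 ++ [r.1], acc.2.1, acc.2.2))
      = (let lowered := doc.map PySem.Str.lower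
         let r := pvBLoop (pvBuild pats).1 (pvBuild pats).2 doc lowered doc.length doc.length 0 [] 0
         if r.2 > 0 then (acc.1 ++ [r.1], acc.2.1 + r.2, acc.2.2 + 1)
         else (acc.1 ++ [r.1], acc.2.1, acc.2.2)) := by
    intro acc doc hdoc
    by_cases hne : [] ∈ pats
    · have hd : doc = [] := hpre hne doc hdoc
      subst hd; rfl
    · rw [pvDoc_eq pats hne doc]
  have hfold := PySem.List.foldl_congr_mem docs _ _ (([], 0, 0) : List (List String) × Int × Int) hstep
  rw [hfold]
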